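-- pv_equiv track=rewrite | github.com/OliverMani/endless-painting | src/service.py | replaceAll
-- ===== SOURCE A (Python) =====
-- stafir = "ABCDEFGHIJKLMNOPQRSTUVWXYZ_-abcdefghijklmnopqrstuvwxyz0123456789."
--
-- def replaceAll(strengur):
-- 	strengur2 = ""
--
-- 	for x in strengur:
-- 		if stafir.count(x) == 0:
-- 			strengur2 += "_"
-- 		else:
-- 			strengur2 += x
-- 	return strengur2
-- ===== SOURCE B (Python) =====
-- stafir = "ABCDEFGHIJKLMNOPQRSTUVWXYZ_-abcdefghijklmnopqrstuvwxyz0123456789."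
--
-- def replaceAll(strengur):
--     # Whole-string replacement pass per distinct disallowed character:
--     # correct because each pass substitutes '_' (itself an allowed character,
--     # so never touched by a later pass), and the passes are independent.
--     for c in set(strengur) - set(stafir):
--         strengur = strengur.replace(c, "_")
--     return strengur
-- ===== Notes on version B (the rewrite author's own statement) =====
-- stated objective: faster
-- what changed: B computes the set of distinct disallowed characters actually present and performs one whole-string C-level str.replace pass per such character, instead of A's per-character Python loop that tests each character with stafir.count and appends to an accumulator string.
import Mathlib
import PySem

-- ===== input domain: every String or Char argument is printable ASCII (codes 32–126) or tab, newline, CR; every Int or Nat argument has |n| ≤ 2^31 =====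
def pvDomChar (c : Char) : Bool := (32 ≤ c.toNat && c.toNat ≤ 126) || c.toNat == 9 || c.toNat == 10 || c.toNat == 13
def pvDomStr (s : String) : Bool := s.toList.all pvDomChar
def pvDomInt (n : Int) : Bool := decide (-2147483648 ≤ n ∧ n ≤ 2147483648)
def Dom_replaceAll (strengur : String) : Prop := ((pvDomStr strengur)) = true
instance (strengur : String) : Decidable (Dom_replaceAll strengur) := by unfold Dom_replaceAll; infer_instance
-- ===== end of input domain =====

-- B replaces A's per-character accumulation loop by one whole-string replace pass per
-- distinct disallowed character present (set difference set(s) - set(stafir)); return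
-- values proved equal for all strings (Python's arbitrary set order is irrelevant:
-- the passes are independent and '_' is allowed, so never touched again).

-- ===== PORT A =====
-- module-level constant stafir
def pvStafir : List Char :=
  "ABCDEFGHIJKLMNOPQRSTUVWXYZ_-abcdefghijklmnopqrstuvwxyz0123456789.".toList

-- for x in strengur: strengur2 += "_" if stafir.count(x) == 0 else x
def replaceAll (strengur : String) : String :=
  String.ofList (strengur.toList.foldl
    (fun strengur2 x =>
      if PySem.Chars.count pvStafir [x] = 0 then strengur2 ++ ['_'] else strengur2 ++ [x])
    [])

-- ===== PORT B =====
-- for c in set(strengur) - set(stafir): strengur = strengur.replace(c, "_")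
-- (Python iterates the set in an unspecified order; the passes commute, so any fixed
-- order — here first-occurrence order — yields the same string.)
def replaceAll_alt (strengur : String) : String :=
  String.ofList
    ((PySem.Set.diff (PySem.Set.ofList strengur.toList) (PySem.Set.ofList pvStafir)).foldl
      (fun s c => PySem.Chars.replace s [c] ['_']) strengur.toList)

-- ===== PRECONDITION & SPEC =====
def Spec_replaceAll (strengur : String) (out : String) : Prop := out = replaceAll_alt strengur
instance (strengur : String) (out : String) : Decidable (Spec_replaceAll strengur out) := by unfold Spec_replaceAll; infer_instance

-- ===== CLAIM (what is proved, stated in full; the proofs are below) =====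
def Claim_equal_replaceAll : Prop := ∀ (strengur : String), Dom_replaceAll strengur → Spec_replaceAll strengur (replaceAll strengur)

-- ===== LEMMAS AND PROOFS =====

-- Chars.count.go on a single-character needle counts occurrences of that character.
theorem pv_count_go_singleton (c : Char) (l : List Char) (acc fuel : Nat)
    (h : l.length ≤ fuel) :
    PySem.Chars.count.go [c] fuel l acc = acc + l.count c := by
  induction l generalizing fuel acc with
  | nil => cases fuel <;> simp [PySem.Chars.count.go]
  | cons hd tl ih =>
    cases fuel with
    | zero => simp at h
    | succ f =>
      have hf : tl.length ≤ f := by simpa using h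
      rw [PySem.Chars.count.go]
      by_cases hc : c = hd
      · subst hc
        simp [ih _ _ hf]
        omega
      · have hp : List.isPrefixOf [c] (hd :: tl) = false := by
          simp [List.isPrefixOf]; exact fun h' => (hc h').elim
        simp [hp, ih _ _ hf, Ne.symm hc]

-- str.count with a single-character needle is the character count.
theorem pv_count_singleton (c : Char) (s : List Char) :
    PySem.Chars.count s [c] = s.count c := by
  simp [PySem.Chars.count, pv_count_go_singleton c s 0 s.length le_rfl]

-- Chars.replace.go with a single-character needle and replacement is a map.
theorem pv_replace_go_singleton (c r : Char) (l : List Char) (acc : List Char) (fuel : Nat)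
    (h : l.length ≤ fuel) :
    PySem.Chars.replace.go [c] [r] fuel l acc
      = acc.reverse ++ l.map (fun x => if x = c then r else x) := by
  induction l generalizing fuel acc with
  | nil => cases fuel <;> simp [PySem.Chars.replace.go]
  | cons hd tl ih =>
    cases fuel with
    | zero => simp at h
    | succ f =>
      have hf : tl.length ≤ f := by simpa using h
      rw [PySem.Chars.replace.go]
      by_cases hc : hd = c
      · subst hc
        have hp : List.isPrefixOf [hd] (hd :: tl) = true := by simp [List.isPrefixOf]
        simp [hp, ih _ _ hf]
      · have hp : List.isPrefixOf [c] (hd :: tl) = false := by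
          simp [List.isPrefixOf]; exact fun h' => (hc h'.symm).elim
        simp [hp, ih _ _ hf, hc]

-- s.replace(c, r) with single characters is a map.
theorem pv_replace_singleton (c r : Char) (s : List Char) :
    PySem.Chars.replace s [c] [r] = s.map (fun x => if x = c then r else x) := by
  simp [PySem.Chars.replace, pv_replace_go_singleton c r s [] s.length le_rfl]

-- Folding the single-character replace passes over a list of characters not containing
-- '_' substitutes '_' exactly at the members of that list.
theorem pv_fold_replace (bads : List Char) (s : List Char) (hno : '_' ∉ bads) :
    bads.foldl (fun s c => PySem.Chars.replace s [c] ['_']) s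
      = s.map (fun x => if x ∈ bads then '_' else x) := by
  induction bads generalizing s with
  | nil => simp
  | cons b bs ih =>
    have hno' : '_' ∉ bs := fun h => hno (List.mem_cons_of_mem _ h)
    have hb : b ≠ '_' := fun h => hno (by simp [h])
    rw [List.foldl_cons, pv_replace_singleton, ih _ hno', List.map_map]
    refine List.map_congr_left (fun x _ => ?_)
    by_cases hx : x = b
    · subst hx
      simp [hno']
    · simp [Function.comp, hx]

-- Membership in set(strengur) - set(stafir).
theorem pv_mem_bads (s : List Char) (x : Char) :
    x ∈ PySem.Set.diff (PySem.Set.ofList s) (PySem.Set.ofList pvStafir)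
      ↔ x ∈ s ∧ x ∉ pvStafir := by
  simp [PySem.Set.diff, List.mem_filter, PySem.Set.mem_ofList, PySem.Set.contains,
    PySem.Set.mem_ofList]

-- ===== VERDICT (by name: the statement is the Claim_ definition above) =====
theorem replaceAll_spec : Claim_equal_replaceAll := by
  intro strengur _
  unfold Spec_replaceAll replaceAll replaceAll_alt
  congr 1
  set l := strengur.toList with hl
  set bads := PySem.Set.diff (PySem.Set.ofList l) (PySem.Set.ofList pvStafir) with hbads
  have hno : '_' ∉ bads := by
    rw [hbads, pv_mem_bads]
    rintro ⟨-, h⟩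
    exact h (by decide)
  -- A's fold is a map
  have hA : l.foldl
      (fun s2 x => if PySem.Chars.count pvStafir [x] = 0 then s2 ++ ['_'] else s2 ++ [x]) []
      = l.map (fun x => if x ∈ pvStafir then x else '_') := by
    have hbr : ∀ (s2 : List Char) (x : Char), x ∈ l →
        (if PySem.Chars.count pvStafir [x] = 0 then s2 ++ ['_'] else s2 ++ [x])
          = s2 ++ [if x ∈ pvStafir then x else '_'] := by
      intro s2 x _
      rw [pv_count_singleton]
      by_cases hx : x ∈ pvStafir
      · have : pvStafir.count x ≠ 0 := by simpa [List.count_eq_zero] using hx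
        simp [this, hx]
      · have : pvStafir.count x = 0 := List.count_eq_zero.mpr hx
        simp [this, hx]
    calc l.foldl
          (fun s2 x => if PySem.Chars.count pvStafir [x] = 0 then s2 ++ ['_'] else s2 ++ [x]) []
        = l.foldl (fun s2 x => s2 ++ [if x ∈ pvStafir then x else '_']) [] :=
          PySem.List.foldl_congr_mem _ _ _ _ hbr
      _ = l.map (fun x => if x ∈ pvStafir then x else '_') := by
          simpa using PySem.List.foldl_append_singleton_eq_map
            (f := fun x => if x ∈ pvStafir then x else '_') (l := l) (acc := [])
  rw [hA, pv_fold_replace bads l hno]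
  refine (List.map_congr_left (fun x hx => ?_)).symm
  by_cases hmem : x ∈ pvStafir
  · have : x ∉ bads := by rw [hbads, pv_mem_bads]; exact fun h => h.2 hmem
    simp [this, hmem]
  · have : x ∈ bads := by rw [hbads, pv_mem_bads]; exact ⟨hx, hmem⟩
    simp [this, hmem]
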